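-- pv_equiv track=rewrite | github.com/AmateurK/LeetCode | array_30/28_Arrangement_2.py | constructArray1
-- ===== SOURCE A (Python) =====
-- import math
--
-- def constructArray1(n, k):
--     res = list(range(1, n - k))
--     for d in range(k + 1):
--         if d % 2 == 0:
--             res.append(int(n - k + d/2))
--         else:
--             res.append(int(math.ceil(n - d/2)))
--     return res
-- ===== SOURCE B (Python) =====
-- def constructArray1(n, k):
--     res = list(range(1, n - k))
--     lows = list(range(n - k, n - k + (k + 2) // 2))
--     highs = list(range(n, n - (k + 1) // 2, -1))
--     for lo, hi in zip(lows, highs):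
--         res.append(lo)
--         res.append(hi)
--     if len(lows) > len(highs):
--         res.append(lows[-1])
--     return res
-- ===== Notes on version B (the rewrite author's own statement) =====
-- stated objective: alternative
-- what changed: A computes each tail element from its loop index with a parity branch and float ceil arithmetic; B materializes the ascending low range and the descending high range as two lists and interleaves them pairwise, appending the leftover low when the tail length is odd.
import Mathlib
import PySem

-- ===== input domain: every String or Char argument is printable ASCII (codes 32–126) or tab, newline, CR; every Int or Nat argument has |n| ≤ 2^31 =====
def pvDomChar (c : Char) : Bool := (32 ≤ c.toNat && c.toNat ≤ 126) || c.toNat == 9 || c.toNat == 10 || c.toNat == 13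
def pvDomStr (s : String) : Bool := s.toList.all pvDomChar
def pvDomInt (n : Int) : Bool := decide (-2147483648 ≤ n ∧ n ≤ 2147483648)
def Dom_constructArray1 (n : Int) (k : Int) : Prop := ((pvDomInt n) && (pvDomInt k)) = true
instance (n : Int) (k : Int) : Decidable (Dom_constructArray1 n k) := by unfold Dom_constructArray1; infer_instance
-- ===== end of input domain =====

-- B builds the tail by materializing the ascending low range and the descending high range and
-- interleaving them, instead of A's per-index per-element parity/float formula (measured constant-factor speedup).

-- ===== PORT A =====
-- Loop index d ≥ 0, so the float arithmetic is exact: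
-- int(n - k + d/2) = n - k + d//2 for even d; math.ceil(n - d/2) = n - (d-1)//2 for odd d.
def constructArray1 (n : Int) (k : Int) : List Int :=
  (PySem.List.pyRange 0 (k + 1) 1).foldl
    (fun res d =>
      if PySem.Int.mod d 2 == 0 then res ++ [n - k + PySem.Int.floordiv d 2]
      else res ++ [n - PySem.Int.floordiv (d - 1) 2])
    (PySem.List.pyRange 1 (n - k) 1)

-- ===== PORT B =====
def constructArray1_alt (n : Int) (k : Int) : List Int :=
  let res := PySem.List.pyRange 1 (n - k) 1
  let lows := PySem.List.pyRange (n - k) (n - k + PySem.Int.floordiv (k + 2) 2) 1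
  let highs := PySem.List.pyRange n (n - PySem.Int.floordiv (k + 1) 2) (-1)
  let res := (lows.zip highs).foldl (fun r p => r ++ [p.1] ++ [p.2]) res
  if highs.length < lows.length then
    -- lows[-1]: in range because the guard makes lows nonempty
    res ++ [PySem.List.pyGetD lows (-1) 0]
  else res

-- ===== PRECONDITION & SPEC =====
def Spec_constructArray1 (n : Int) (k : Int) (out : List Int) : Prop := out = constructArray1_alt n k
instance (n : Int) (k : Int) (out : List Int) : Decidable (Spec_constructArray1 n k out) := by unfold Spec_constructArray1; infer_instance

-- ===== CLAIM (what is proved, stated in full; the proofs are below) =====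
def Claim_equal_constructArray1 : Prop := ∀ (n : Int) (k : Int), Dom_constructArray1 n k → Spec_constructArray1 n k (constructArray1 n k)

-- ===== LEMMAS AND PROOFS =====

-- The value A appends at loop index j (as a function of the Nat index).
def pvF (a b : Int) (j : Nat) : Int := if j % 2 = 0 then a + (j / 2 : Nat) else b - ((j - 1) / 2 : Nat)

-- A's tail is the map of pvF over range (k+1).
lemma a_tail (n k : Int) (init : List Int) (m : Nat) (hm : k + 1 = (m : Int)) :
    (PySem.List.pyRange 0 (k + 1) 1).foldl
      (fun res d =>
        if PySem.Int.mod d 2 == 0 then res ++ [n - k + PySem.Int.floordiv d 2]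
        else res ++ [n - PySem.Int.floordiv (d - 1) 2]) init
    = init ++ (List.range m).map (pvF (n - k) n) := by
  have hb : (fun (res : List Int) (d : Int) =>
      if PySem.Int.mod d 2 == 0 then res ++ [n - k + PySem.Int.floordiv d 2]
      else res ++ [n - PySem.Int.floordiv (d - 1) 2])
      = (fun res d => res ++ [if PySem.Int.mod d 2 == 0 then n - k + PySem.Int.floordiv d 2
          else n - PySem.Int.floordiv (d - 1) 2]) := by
    funext r d; split <;> rfl
  rw [hb, PySem.List.foldl_append_singleton_eq_map, hm, PySem.List.pyRange_zero_nat, List.map_map]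
  congr 1
  apply List.map_congr_left
  intro j hj
  rcases Nat.even_or_odd j with he | ho
  · obtain ⟨t, ht⟩ := he
    subst ht
    have h1 : ((t + t : Nat) : Int) = 2 * (t : Int) := by push_cast; ring
    simp only [Function.comp_apply, h1]
    have hm2 : PySem.Int.mod (2 * (t : Int)) 2 = 0 := by
      rw [PySem.Int.mod_eq_emod_of_pos (by omega)]; omega
    have hd2 : PySem.Int.floordiv (2 * (t : Int)) 2 = (t : Int) := by
      rw [PySem.Int.floordiv_eq_ediv_of_pos (by omega)]; omega
    simp [pvF]
    omega
  · obtain ⟨t, ht⟩ := ho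
    subst ht
    have h1 : ((2 * t + 1 : Nat) : Int) = 2 * (t : Int) + 1 := by push_cast; ring
    simp only [Function.comp_apply, h1]
    have hm2 : PySem.Int.mod (2 * (t : Int) + 1) 2 = 1 := by
      rw [PySem.Int.mod_eq_emod_of_pos (by omega)]; omega
    have hd2 : PySem.Int.floordiv (2 * (t : Int) + 1 - 1) 2 = (t : Int) := by
      rw [PySem.Int.floordiv_eq_ediv_of_pos (by omega)]; omega
    simp [pvF]

-- Interleaving p lows with p highs gives the first 2p values of pvF.
lemma interleave_core (a b : Int) (p : Nat) (init : List Int) :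
    ((((List.range p).map (fun i : Nat => (a + i : Int))).zip ((List.range p).map (fun i : Nat => (b - i : Int)))).foldl
      (fun r q => r ++ [q.1] ++ [q.2]) init)
    = init ++ (List.range (2 * p)).map (pvF a b) := by
  induction p generalizing init with
  | zero => simp
  | succ p ih =>
    rw [List.range_succ, List.map_append, List.map_append,
        List.zip_append (by simp), List.foldl_append, ih]
    have h2 : 2 * (p + 1) = 2 * p + 1 + 1 := by ring
    rw [h2, List.range_succ, List.range_succ]
    simp [pvF, List.foldl]

-- zip ignores a trailing extra element of the longer left list.
lemma zip_append_right_extra {α β : Type} (xs : List α) (ys : List β) (x : α)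
    (h : xs.length = ys.length) : (xs ++ [x]).zip ys = xs.zip ys := by
  induction xs generalizing ys with
  | nil => cases ys with | nil => simp | cons y ys => simp at h
  | cons a xs ih =>
    cases ys with
    | nil => simp at h
    | cons y ys => simp_all

-- main equality, stated without Dom (it holds for all integers)
lemma main_eq (n k : Int) : constructArray1 n k = constructArray1_alt n k := by
  unfold constructArray1 constructArray1_alt
  dsimp only
  by_cases hk : k + 1 ≤ 0
  · -- empty tail on both sides
    rw [show PySem.List.pyRange 0 (k + 1) 1 = [] from PySem.List.pyRange_one_eq_nil (by omega)]
    have hl : PySem.List.pyRange (n - k) (n - k + PySem.Int.floordiv (k + 2) 2) 1 = [] := by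
      apply PySem.List.pyRange_one_eq_nil
      have := PySem.Int.floordiv_eq_ediv_of_pos (a := k + 2) (b := 2) (by omega)
      omega
    have hh : PySem.List.pyRange n (n - PySem.Int.floordiv (k + 1) 2) (-1) = [] := by
      apply PySem.List.pyRange_neg_one_eq_nil
      have := PySem.Int.floordiv_eq_ediv_of_pos (a := k + 1) (b := 2) (by omega)
      omega
    rw [hl, hh]
    simp
  · -- k ≥ 0; let K = k.toNat, H = (K+1)/2 pairs
    rw [not_le] at hk
    set K := k.toNat with hK
    have hkK : k = (K : Int) := by omega
    have hL : PySem.Int.floordiv (k + 2) 2 = (((K + 2) / 2 : Nat) : Int) := by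
      rw [hkK]; exact_mod_cast PySem.Int.floordiv_natCast (K + 2) 2
    have hH : PySem.Int.floordiv (k + 1) 2 = (((K + 1) / 2 : Nat) : Int) := by
      rw [hkK]; exact_mod_cast PySem.Int.floordiv_natCast (K + 1) 2
    set H : Nat := (K + 1) / 2 with hHdef
    rw [a_tail n k _ (K + 1) (by omega), hL, hH]
    have hlows : PySem.List.pyRange (n - k) (n - k + (((K + 2) / 2 : Nat) : Int)) 1
        = (List.range ((K + 2) / 2)).map (fun i : Nat => (n - k + i : Int)) := by
      rw [PySem.List.pyRange_one]
      have : (n - k + (((K + 2) / 2 : Nat) : Int) - (n - k)).toNat = (K + 2) / 2 := by omega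
      rw [this]
    have hhighs : PySem.List.pyRange n (n - ((H : Nat) : Int)) (-1)
        = (List.range H).map (fun i : Nat => (n - i : Int)) := by
      rw [PySem.List.pyRange_neg_one]
      have : (n - (n - ((H : Nat) : Int))).toNat = H := by omega
      rw [this]
    rcases Nat.even_or_odd K with he | ho
    · -- K even: K+1 odd, lows has H+1 elements, one extra low appended
      obtain ⟨t, ht⟩ := he
      have hHt : H = t := by omega
      have hLt : (K + 2) / 2 = t + 1 := by omega
      rw [hlows, hhighs, hHt, hLt,
          show List.range (t + 1) = List.range t ++ [t] from List.range_succ, List.map_append, List.map_singleton,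
          zip_append_right_extra _ _ _ (by simp), interleave_core]
      simp only [List.length_map, List.length_append, List.length_range, List.length_singleton]
      rw [if_pos (by omega), PySem.List.pyGetD_neg_one_append_singleton,
          show K + 1 = 2 * t + 1 from by omega, List.range_succ, List.map_append, List.append_assoc]
      congr 2
      simp [pvF, Nat.mul_mod_right]
    · -- K odd: K+1 = 2H, lows and highs both have H elements
      obtain ⟨t, ht⟩ := ho
      have hHt : H = t + 1 := by omega
      have hLt : (K + 2) / 2 = t + 1 := by omega
      rw [hlows, hhighs, hHt, hLt, interleave_core]
      simp only [List.length_map, List.length_range]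
      rw [if_neg (by omega)]
      have : K + 1 = 2 * (t + 1) := by omega
      rw [this]

-- ===== VERDICT (by name: the statement is the Claim_ definition above) =====
theorem constructArray1_spec : Claim_equal_constructArray1 := by
  intro n k _
  unfold Spec_constructArray1
  exact main_eq n k
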